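-- pv_equiv track=rewrite | github.com/keepdevops/GeneraTestum | pytest_gen/coverage_analyzer.py | _find_class_context
-- ===== SOURCE A (Python) =====
-- from typing import Dict, List, Any
--
-- def _find_class_context(lines: List[str], line_num: int) -> str:
--     """Find the class that contains the given line."""
--     for i in range(line_num - 1, -1, -1):
--         line = lines[i].strip()
--         if line.startswith('class '):
--             # Extract class name
--             parts = line.split()
--             if len(parts) > 1:
--                 class_name = parts[1].split('(')[0].split(':')[0]
--                 return class_name
--     return None
-- ===== SOURCE B (Python) =====
-- from typing import List
--
-- def _find_class_context(lines: List[str], line_num: int) -> str: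
--     """Find the class that contains the given line (forward scan, keep last seen)."""
--     result = None
--     for i in range(line_num):
--         line = lines[i].strip()
--         if line.startswith('class '):
--             parts = line.split()
--             if len(parts) > 1:
--                 result = parts[1].split('(')[0].split(':')[0]
--     return result
-- ===== Notes on version B (the rewrite author's own statement) =====
-- stated objective: alternative
-- what changed: Backward scan with early return on the first class line found is replaced by a forward scan over the first line_num lines that keeps the last valid class name seen in an accumulator.
import Mathlib
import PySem

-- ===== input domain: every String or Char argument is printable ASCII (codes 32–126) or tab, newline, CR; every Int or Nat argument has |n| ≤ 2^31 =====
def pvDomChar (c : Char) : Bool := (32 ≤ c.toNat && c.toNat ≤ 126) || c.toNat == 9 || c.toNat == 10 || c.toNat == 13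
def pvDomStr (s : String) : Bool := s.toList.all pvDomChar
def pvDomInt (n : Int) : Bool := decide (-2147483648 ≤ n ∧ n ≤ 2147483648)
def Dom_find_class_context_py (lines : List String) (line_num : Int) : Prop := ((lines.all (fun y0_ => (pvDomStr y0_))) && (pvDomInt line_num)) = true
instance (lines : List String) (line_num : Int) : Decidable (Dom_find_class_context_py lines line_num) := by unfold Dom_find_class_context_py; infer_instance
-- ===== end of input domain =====

-- B replaces A's backward scan with early return by a forward scan keeping the last valid class name (alternative decomposition, same cost).

-- shared name extraction: parts[1].split('(')[0].split(':')[0] when len(parts) > 1, else no hit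
def pvHitLine (raw : String) : Option String :=
  let line := PySem.Str.strip raw
  if PySem.Str.startswith line "class " then
    let parts := PySem.Str.split₀ line
    if parts.length > 1 then
      some ((((PySem.Str.split? ((((PySem.Str.split? (parts.getD 1 "") "(").getD []).getD 0 "")) ":").getD []).getD 0 ""))
    else none
  else none

-- ===== PORT A =====
-- backward loop 'for i in range(line_num - 1, -1, -1)' with early return; lines[i] is in range under Pre_
def pvGoA (lines : List String) : List Int → Option String
  | [] => none
  | i :: rest =>
    match pvHitLine (PySem.List.pyGetD lines i "") with
    | some name => some name
    | none => pvGoA lines rest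

def find_class_context_py (lines : List String) (line_num : Int) : Option String :=
  pvGoA lines (PySem.List.pyRange (line_num - 1) (-1) (-1))

-- ===== PORT B =====
-- forward loop 'for i in range(line_num)' with accumulator 'result', last hit wins
def find_class_context_py_alt (lines : List String) (line_num : Int) : Option String :=
  (PySem.List.pyRange 0 line_num 1).foldl
    (fun result i =>
      match pvHitLine (PySem.List.pyGetD lines i "") with
      | some name => some name
      | none => result) none

-- ===== PRECONDITION & SPEC =====
-- A raises IndexError when line_num > len(lines) (first access lines[line_num - 1]); B raises there too.
def Pre_find_class_context_py (lines : List String) (line_num : Int) : Prop := line_num ≤ lines.length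
instance (lines : List String) (line_num : Int) : Decidable (Pre_find_class_context_py lines line_num) := by unfold Pre_find_class_context_py; infer_instance
def pvWitness_find_class_context_py : List String × Int := (["class A:", "x = 1"], 2)

def Spec_find_class_context_py (lines : List String) (line_num : Int) (out : Option String) : Prop := out = find_class_context_py_alt lines line_num
instance (lines : List String) (line_num : Int) (out : Option String) : Decidable (Spec_find_class_context_py lines line_num out) := by unfold Spec_find_class_context_py; infer_instance

-- ===== CLAIM (what is proved, stated in full; the proofs are below) =====
def Claim_equal_find_class_context_py : Prop := ∀ (lines : List String) (line_num : Int), Dom_find_class_context_py lines line_num → Pre_find_class_context_py lines line_num → Spec_find_class_context_py lines line_num (find_class_context_py lines line_num)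

-- ===== LEMMAS AND PROOFS =====

-- A's early-return scan is findSome? over its index list
theorem pvGoA_eq_findSome (lines : List String) (l : List Int) :
    pvGoA lines l = l.findSome? (fun i => pvHitLine (PySem.List.pyGetD lines i "")) := by
  induction l with
  | nil => rfl
  | cons i rest ih =>
    cases h : pvHitLine (PySem.List.pyGetD lines i "") <;>
      simp [pvGoA, List.findSome?, ih, h]

-- B's last-hit-wins fold is findSome? over the reversed index list
theorem pvFoldl_eq_findSome (lines : List String) (l : List Int) (acc : Option String) :
    l.foldl (fun result i =>
      match pvHitLine (PySem.List.pyGetD lines i "") with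
      | some name => some name
      | none => result) acc
    = match l.reverse.findSome? (fun i => pvHitLine (PySem.List.pyGetD lines i "")) with
      | some name => some name
      | none => acc := by
  induction l generalizing acc with
  | nil => rfl
  | cons i rest ih =>
    simp only [List.foldl_cons, ih, List.reverse_cons, List.findSome?_append]
    cases h : rest.reverse.findSome? (fun i => pvHitLine (PySem.List.pyGetD lines i "")) with
    | some name => simp [List.findSome?]
    | none =>
      cases hhit : pvHitLine (PySem.List.pyGetD lines i "") <;>
        simp [List.findSome?, hhit]

-- A's countdown range is the reverse of B's forward range
theorem pvRange_rev (n : Int) :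
    (PySem.List.pyRange 0 n 1).reverse = PySem.List.pyRange (n - 1) (-1) (-1) := by
  rw [PySem.List.pyRange_one, PySem.List.pyRange_neg_one]
  apply List.ext_getElem
  · simp
  · intro k h1 h2
    simp only [List.length_reverse, List.length_map, List.length_range] at h1 h2
    rw [List.getElem_reverse]
    simp only [List.getElem_map, List.getElem_range, List.length_map, List.length_range]
    omega

-- ===== VERDICT (by name: the statement is the Claim_ definition above) =====
theorem find_class_context_py_spec : Claim_equal_find_class_context_py := by
  intro lines line_num _ _
  unfold Spec_find_class_context_py find_class_context_py find_class_context_py_alt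
  rw [pvGoA_eq_findSome, pvFoldl_eq_findSome, pvRange_rev]
  cases (PySem.List.pyRange (line_num - 1) (-1) (-1)).findSome?
      (fun i => pvHitLine (PySem.List.pyGetD lines i "")) <;> rfl
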